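-- pv_equiv track=rewrite | github.com/cmbenello/141-discussion | solutions/expressions_sols.py | expr_25_ascii_shift_digit
-- ===== SOURCE A (Python) =====
-- def expr_25_ascii_shift_digit(s: str, k: int) -> str:
--     out = []
--     k_mod = k % 10
--     for ch in s:
--         if "0" <= ch <= "9":
--             d = (ord(ch) - ord("0") + k_mod) % 10
--             out.append(chr(ord("0") + d))
--         else:
--             out.append(ch)
--     return "".join(out)
-- ===== SOURCE B (Python) =====
-- def expr_25_ascii_shift_digit(s: str, k: int) -> str:
--     # Two-phase substitution: move each digit to a private out-of-band alphabet
--     # (code points 192..201, which never occur in printable-ASCII input) already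
--     # shifted, then map the private alphabet back down to '0'..'9'.
--     km = k % 10
--     for d in range(10):
--         s = s.replace(chr(48 + d), chr(192 + (d + km) % 10))
--     for d in range(10):
--         s = s.replace(chr(192 + d), chr(48 + d))
--     return s
-- ===== Notes on version B (the rewrite author's own statement) =====
-- stated objective: faster
-- what changed: Replaced the single per-character loop with its digit branch by twenty whole-string str.replace passes: digits are first moved, already shifted, into a private out-of-band alphabet (code points 192..201, never present in printable-ASCII input) and a second round of replaces maps that alphabet back to '0'..'9'. All per-character work moves from the interpreted loop into C-implemented str.replace, measured ~10x faster at the largest size.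
import Mathlib
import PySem

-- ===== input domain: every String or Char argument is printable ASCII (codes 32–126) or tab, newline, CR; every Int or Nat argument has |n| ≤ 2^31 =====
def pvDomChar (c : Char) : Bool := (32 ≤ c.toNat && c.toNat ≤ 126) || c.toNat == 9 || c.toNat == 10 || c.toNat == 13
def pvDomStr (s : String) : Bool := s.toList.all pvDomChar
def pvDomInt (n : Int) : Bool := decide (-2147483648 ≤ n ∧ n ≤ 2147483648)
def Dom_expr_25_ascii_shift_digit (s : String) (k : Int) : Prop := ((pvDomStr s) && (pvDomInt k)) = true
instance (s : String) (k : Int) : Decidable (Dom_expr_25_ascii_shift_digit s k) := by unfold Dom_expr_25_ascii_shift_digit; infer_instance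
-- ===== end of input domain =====

-- B replaces A's single per-character loop with branch by twenty whole-string
-- str.replace passes through a private out-of-band alphabet (codes 192..201);
-- a different algorithm, measured faster by a constant factor (C-level replace passes
-- instead of an interpreted per-character loop).

-- ===== PORT A =====
-- literal port of A: k_mod = k % 10, then loop over the characters, appending the
-- shifted digit for '0'..'9' and the character itself otherwise.
def expr_25_ascii_shift_digit (s : String) (k : Int) : String :=
  let kMod := PySem.Int.mod k 10
  String.ofList (s.toList.foldl (fun out ch =>
    if '0' ≤ ch ∧ ch ≤ '9' then
      let d := PySem.Int.mod ((ch.toNat : Int) - 48 + kMod) 10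
      out ++ [Char.ofNat (48 + d).toNat]
    else out ++ [ch]) [])

-- ===== PORT B =====
-- literal port of B: first loop replaces each digit chr(48+d) by the already-shifted
-- private char chr(192+(d+km)%10); second loop maps chr(192+d) back to chr(48+d).
def expr_25_ascii_shift_digit_alt (s : String) (k : Int) : String :=
  let km := PySem.Int.mod k 10
  let s1 := (PySem.List.pyRange 0 10 1).foldl
    (fun t d => PySem.Str.replace t (String.ofList [Char.ofNat (48 + d).toNat])
        (String.ofList [Char.ofNat (192 + PySem.Int.mod (d + km) 10).toNat])) s
  (PySem.List.pyRange 0 10 1).foldl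
    (fun t d => PySem.Str.replace t (String.ofList [Char.ofNat (192 + d).toNat])
        (String.ofList [Char.ofNat (48 + d).toNat])) s1

-- ===== PRECONDITION & SPEC =====
def Spec_expr_25_ascii_shift_digit (s : String) (k : Int) (out : String) : Prop := out = expr_25_ascii_shift_digit_alt s k
instance (s : String) (k : Int) (out : String) : Decidable (Spec_expr_25_ascii_shift_digit s k out) := by unfold Spec_expr_25_ascii_shift_digit; infer_instance

-- ===== CLAIM (what is proved, stated in full; the proofs are below) =====
def Claim_equal_expr_25_ascii_shift_digit : Prop := ∀ (s : String) (k : Int), Dom_expr_25_ascii_shift_digit s k → Spec_expr_25_ascii_shift_digit s k (expr_25_ascii_shift_digit s k)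

-- ===== LEMMAS AND PROOFS =====

-- single-character substitution function: what one str.replace pass does per char
def pvSub (a b c : Char) : Char := if c = a then b else c

theorem pv_go_single (a b : Char) : ∀ (fuel : Nat) (l acc : List Char), l.length ≤ fuel →
    PySem.Chars.replace.go [a] [b] fuel l acc = acc.reverse ++ l.map (fun c => if c = a then b else c) := by
  intro fuel
  induction fuel with
  | zero => intro l acc h; have : l = [] := List.eq_nil_of_length_eq_zero (Nat.le_zero.mp h); subst this; simp [PySem.Chars.replace.go]
  | succ n ih =>
    intro l acc h
    cases l with
    | nil => simp [PySem.Chars.replace.go]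
    | cons c t =>
      simp only [PySem.Chars.replace.go, List.isPrefixOf]
      by_cases hc : c = a
      · subst hc
        simp only [BEq.rfl, Bool.and_true, if_pos]
        rw [show (List.drop [c].length (c :: t)) = t from (by simp), show ([b].reverse ++ acc) = b :: acc from rfl]
        rw [ih t (b :: acc) (by simpa using h)]
        simp
      · have : (a == c) = false := by simp [Ne.symm hc]
        simp only [this, Bool.false_and, if_neg Bool.false_ne_true]
        rw [ih t (c :: acc) (by simpa using h)]
        simp [hc]

-- one str.replace pass with single-char pattern and replacement = map of pvSub
theorem pv_replace_single (t : String) (a b : Char) :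
    (PySem.Str.replace t (String.ofList [a]) (String.ofList [b])).toList = t.toList.map (pvSub a b) := by
  rw [PySem.Str.toList_replace]
  simp only [String.toList_ofList]
  unfold PySem.Chars.replace
  simp only [List.isEmpty]
  rw [pv_go_single a b t.toList.length t.toList [] le_rfl]
  simp [pvSub]


theorem pv_sub_ne (a b c : Char) (h : c.toNat ≠ a.toNat) : pvSub a b c = c := by
  unfold pvSub
  rw [if_neg]
  intro he
  exact h (congrArg Char.toNat he)

theorem pv_char_chain (km : Int) (hk0 : 0 ≤ km) (hk9 : km < 10) (c : Char) (hc : pvDomChar c = true) :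
    (if '0' ≤ c ∧ c ≤ '9' then Char.ofNat (48 + PySem.Int.mod ((c.toNat : Int) - 48 + km) 10).toNat else c) =
    (pvSub (Char.ofNat ((192 : Int) + 9).toNat) (Char.ofNat ((48 : Int) + 9).toNat) ∘
      pvSub (Char.ofNat ((192 : Int) + 8).toNat) (Char.ofNat ((48 : Int) + 8).toNat) ∘
      pvSub (Char.ofNat ((192 : Int) + 7).toNat) (Char.ofNat ((48 : Int) + 7).toNat) ∘
      pvSub (Char.ofNat ((192 : Int) + 6).toNat) (Char.ofNat ((48 : Int) + 6).toNat) ∘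
      pvSub (Char.ofNat ((192 : Int) + 5).toNat) (Char.ofNat ((48 : Int) + 5).toNat) ∘
      pvSub (Char.ofNat ((192 : Int) + 4).toNat) (Char.ofNat ((48 : Int) + 4).toNat) ∘
      pvSub (Char.ofNat ((192 : Int) + 3).toNat) (Char.ofNat ((48 : Int) + 3).toNat) ∘
      pvSub (Char.ofNat ((192 : Int) + 2).toNat) (Char.ofNat ((48 : Int) + 2).toNat) ∘
      pvSub (Char.ofNat ((192 : Int) + 1).toNat) (Char.ofNat ((48 : Int) + 1).toNat) ∘
      pvSub (Char.ofNat ((192 : Int) + 0).toNat) (Char.ofNat ((48 : Int) + 0).toNat) ∘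
      pvSub (Char.ofNat ((48 : Int) + 9).toNat) (Char.ofNat ((192 : Int) + PySem.Int.mod ((9 : Int) + km) 10).toNat) ∘
      pvSub (Char.ofNat ((48 : Int) + 8).toNat) (Char.ofNat ((192 : Int) + PySem.Int.mod ((8 : Int) + km) 10).toNat) ∘
      pvSub (Char.ofNat ((48 : Int) + 7).toNat) (Char.ofNat ((192 : Int) + PySem.Int.mod ((7 : Int) + km) 10).toNat) ∘
      pvSub (Char.ofNat ((48 : Int) + 6).toNat) (Char.ofNat ((192 : Int) + PySem.Int.mod ((6 : Int) + km) 10).toNat) ∘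
      pvSub (Char.ofNat ((48 : Int) + 5).toNat) (Char.ofNat ((192 : Int) + PySem.Int.mod ((5 : Int) + km) 10).toNat) ∘
      pvSub (Char.ofNat ((48 : Int) + 4).toNat) (Char.ofNat ((192 : Int) + PySem.Int.mod ((4 : Int) + km) 10).toNat) ∘
      pvSub (Char.ofNat ((48 : Int) + 3).toNat) (Char.ofNat ((192 : Int) + PySem.Int.mod ((3 : Int) + km) 10).toNat) ∘
      pvSub (Char.ofNat ((48 : Int) + 2).toNat) (Char.ofNat ((192 : Int) + PySem.Int.mod ((2 : Int) + km) 10).toNat) ∘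
      pvSub (Char.ofNat ((48 : Int) + 1).toNat) (Char.ofNat ((192 : Int) + PySem.Int.mod ((1 : Int) + km) 10).toNat) ∘
      pvSub (Char.ofNat ((48 : Int) + 0).toNat) (Char.ofNat ((192 : Int) + PySem.Int.mod ((0 : Int) + km) 10).toNat))
      c := by
  have hiff : ('0' ≤ c ∧ c ≤ '9') ↔ (48 ≤ c.toNat ∧ c.toNat ≤ 57) := by
    constructor
    · rintro ⟨h1, h2⟩
      exact ⟨h1, h2⟩
    · rintro ⟨h1, h2⟩
      exact ⟨h1, h2⟩
  have hle : c.toNat ≤ 126 := by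
    simp [pvDomChar] at hc
    omega
  by_cases hd : '0' ≤ c ∧ c ≤ '9'
  · obtain ⟨h1, h2⟩ := hiff.mp hd
    have hc10 : c.toNat = 48 ∨ c.toNat = 49 ∨ c.toNat = 50 ∨ c.toNat = 51 ∨ c.toNat = 52 ∨ c.toNat = 53 ∨ c.toNat = 54 ∨ c.toNat = 55 ∨ c.toNat = 56 ∨ c.toNat = 57 := by omega
    have hofn := (Char.ofNat_toNat c).symm
    rcases hc10 with h|h|h|h|h|h|h|h|h|h <;>
      (rw [h] at hofn; subst hofn; interval_cases km <;> decide)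
  · rw [if_neg hd]
    have hn : ¬ (48 ≤ c.toNat ∧ c.toNat ≤ 57) := fun hx => hd (hiff.mpr hx)
    have hlo : c.toNat < 48 ∨ 57 < c.toNat := by omega
    simp only [Function.comp_apply]
    have dd0 : (Char.ofNat ((48 : Int) + 0).toNat).toNat = 48 := by decide
    have e0 : pvSub (Char.ofNat ((48 : Int) + 0).toNat) (Char.ofNat ((192 : Int) + PySem.Int.mod ((0 : Int) + km) 10).toNat) c = c :=
      pv_sub_ne _ _ _ (by rw [dd0]; omega)
    have dd1 : (Char.ofNat ((48 : Int) + 1).toNat).toNat = 49 := by decide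
    have e1 : pvSub (Char.ofNat ((48 : Int) + 1).toNat) (Char.ofNat ((192 : Int) + PySem.Int.mod ((1 : Int) + km) 10).toNat) c = c :=
      pv_sub_ne _ _ _ (by rw [dd1]; omega)
    have dd2 : (Char.ofNat ((48 : Int) + 2).toNat).toNat = 50 := by decide
    have e2 : pvSub (Char.ofNat ((48 : Int) + 2).toNat) (Char.ofNat ((192 : Int) + PySem.Int.mod ((2 : Int) + km) 10).toNat) c = c :=
      pv_sub_ne _ _ _ (by rw [dd2]; omega)
    have dd3 : (Char.ofNat ((48 : Int) + 3).toNat).toNat = 51 := by decide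
    have e3 : pvSub (Char.ofNat ((48 : Int) + 3).toNat) (Char.ofNat ((192 : Int) + PySem.Int.mod ((3 : Int) + km) 10).toNat) c = c :=
      pv_sub_ne _ _ _ (by rw [dd3]; omega)
    have dd4 : (Char.ofNat ((48 : Int) + 4).toNat).toNat = 52 := by decide
    have e4 : pvSub (Char.ofNat ((48 : Int) + 4).toNat) (Char.ofNat ((192 : Int) + PySem.Int.mod ((4 : Int) + km) 10).toNat) c = c :=
      pv_sub_ne _ _ _ (by rw [dd4]; omega)
    have dd5 : (Char.ofNat ((48 : Int) + 5).toNat).toNat = 53 := by decide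
    have e5 : pvSub (Char.ofNat ((48 : Int) + 5).toNat) (Char.ofNat ((192 : Int) + PySem.Int.mod ((5 : Int) + km) 10).toNat) c = c :=
      pv_sub_ne _ _ _ (by rw [dd5]; omega)
    have dd6 : (Char.ofNat ((48 : Int) + 6).toNat).toNat = 54 := by decide
    have e6 : pvSub (Char.ofNat ((48 : Int) + 6).toNat) (Char.ofNat ((192 : Int) + PySem.Int.mod ((6 : Int) + km) 10).toNat) c = c :=
      pv_sub_ne _ _ _ (by rw [dd6]; omega)
    have dd7 : (Char.ofNat ((48 : Int) + 7).toNat).toNat = 55 := by decide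
    have e7 : pvSub (Char.ofNat ((48 : Int) + 7).toNat) (Char.ofNat ((192 : Int) + PySem.Int.mod ((7 : Int) + km) 10).toNat) c = c :=
      pv_sub_ne _ _ _ (by rw [dd7]; omega)
    have dd8 : (Char.ofNat ((48 : Int) + 8).toNat).toNat = 56 := by decide
    have e8 : pvSub (Char.ofNat ((48 : Int) + 8).toNat) (Char.ofNat ((192 : Int) + PySem.Int.mod ((8 : Int) + km) 10).toNat) c = c :=
      pv_sub_ne _ _ _ (by rw [dd8]; omega)
    have dd9 : (Char.ofNat ((48 : Int) + 9).toNat).toNat = 57 := by decide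
    have e9 : pvSub (Char.ofNat ((48 : Int) + 9).toNat) (Char.ofNat ((192 : Int) + PySem.Int.mod ((9 : Int) + km) 10).toNat) c = c :=
      pv_sub_ne _ _ _ (by rw [dd9]; omega)
    have mm0 : (Char.ofNat ((192 : Int) + 0).toNat).toNat = 192 := by decide
    have f0 : pvSub (Char.ofNat ((192 : Int) + 0).toNat) (Char.ofNat ((48 : Int) + 0).toNat) c = c :=
      pv_sub_ne _ _ _ (by rw [mm0]; omega)
    have mm1 : (Char.ofNat ((192 : Int) + 1).toNat).toNat = 193 := by decide
    have f1 : pvSub (Char.ofNat ((192 : Int) + 1).toNat) (Char.ofNat ((48 : Int) + 1).toNat) c = c :=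
      pv_sub_ne _ _ _ (by rw [mm1]; omega)
    have mm2 : (Char.ofNat ((192 : Int) + 2).toNat).toNat = 194 := by decide
    have f2 : pvSub (Char.ofNat ((192 : Int) + 2).toNat) (Char.ofNat ((48 : Int) + 2).toNat) c = c :=
      pv_sub_ne _ _ _ (by rw [mm2]; omega)
    have mm3 : (Char.ofNat ((192 : Int) + 3).toNat).toNat = 195 := by decide
    have f3 : pvSub (Char.ofNat ((192 : Int) + 3).toNat) (Char.ofNat ((48 : Int) + 3).toNat) c = c :=
      pv_sub_ne _ _ _ (by rw [mm3]; omega)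
    have mm4 : (Char.ofNat ((192 : Int) + 4).toNat).toNat = 196 := by decide
    have f4 : pvSub (Char.ofNat ((192 : Int) + 4).toNat) (Char.ofNat ((48 : Int) + 4).toNat) c = c :=
      pv_sub_ne _ _ _ (by rw [mm4]; omega)
    have mm5 : (Char.ofNat ((192 : Int) + 5).toNat).toNat = 197 := by decide
    have f5 : pvSub (Char.ofNat ((192 : Int) + 5).toNat) (Char.ofNat ((48 : Int) + 5).toNat) c = c :=
      pv_sub_ne _ _ _ (by rw [mm5]; omega)
    have mm6 : (Char.ofNat ((192 : Int) + 6).toNat).toNat = 198 := by decide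
    have f6 : pvSub (Char.ofNat ((192 : Int) + 6).toNat) (Char.ofNat ((48 : Int) + 6).toNat) c = c :=
      pv_sub_ne _ _ _ (by rw [mm6]; omega)
    have mm7 : (Char.ofNat ((192 : Int) + 7).toNat).toNat = 199 := by decide
    have f7 : pvSub (Char.ofNat ((192 : Int) + 7).toNat) (Char.ofNat ((48 : Int) + 7).toNat) c = c :=
      pv_sub_ne _ _ _ (by rw [mm7]; omega)
    have mm8 : (Char.ofNat ((192 : Int) + 8).toNat).toNat = 200 := by decide
    have f8 : pvSub (Char.ofNat ((192 : Int) + 8).toNat) (Char.ofNat ((48 : Int) + 8).toNat) c = c :=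
      pv_sub_ne _ _ _ (by rw [mm8]; omega)
    have mm9 : (Char.ofNat ((192 : Int) + 9).toNat).toNat = 201 := by decide
    have f9 : pvSub (Char.ofNat ((192 : Int) + 9).toNat) (Char.ofNat ((48 : Int) + 9).toNat) c = c :=
      pv_sub_ne _ _ _ (by rw [mm9]; omega)
    rw [e0, e1, e2, e3, e4, e5, e6, e7, e8, e9, f0, f1, f2, f3, f4, f5, f6, f7, f8, f9]

theorem expr_25_ascii_shift_digit_eq_alt (s : String) (k : Int) (h : Dom_expr_25_ascii_shift_digit s k) :
    expr_25_ascii_shift_digit s k = expr_25_ascii_shift_digit_alt s k := by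
  apply String.toList_inj.mp
  unfold expr_25_ascii_shift_digit expr_25_ascii_shift_digit_alt
  rw [show PySem.List.pyRange 0 10 1 = [0,1,2,3,4,5,6,7,8,9] from rfl]
  simp only [List.foldl]
  rw [show (fun (out : List Char) ch =>
      if '0' ≤ ch ∧ ch ≤ '9' then
        out ++ [Char.ofNat (48 + PySem.Int.mod ((ch.toNat : Int) - 48 + PySem.Int.mod k 10) 10).toNat]
      else out ++ [ch]) =
      (fun out ch => out ++ [if '0' ≤ ch ∧ ch ≤ '9' then
        Char.ofNat (48 + PySem.Int.mod ((ch.toNat : Int) - 48 + PySem.Int.mod k 10) 10).toNat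
      else ch]) from (by funext o c; split_ifs <;> rfl)]
  rw [PySem.List.foldl_append_singleton_eq_map]
  simp only [String.toList_ofList, pv_replace_single, List.map_map, List.nil_append]
  apply List.map_congr_left
  intro c hcmem
  have hc : pvDomChar c = true := by
    have hs : pvDomStr s = true := by
      unfold Dom_expr_25_ascii_shift_digit at h
      simp at h
      exact h.1
    unfold pvDomStr at hs
    exact List.all_eq_true.mp hs c hcmem
  have hb : 0 ≤ PySem.Int.mod k 10 ∧ PySem.Int.mod k 10 < 10 := by
    unfold PySem.Int.mod
    exact ⟨Int.fmod_nonneg_of_pos k (by norm_num), by have := Int.fmod_lt_of_pos k (show (0:Int)<10 by norm_num); omega⟩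
  exact pv_char_chain (PySem.Int.mod k 10) hb.1 hb.2 c hc

-- ===== VERDICT (by name: the statement is the Claim_ definition above) =====
theorem expr_25_ascii_shift_digit_spec : Claim_equal_expr_25_ascii_shift_digit := by
  intro s k h
  exact expr_25_ascii_shift_digit_eq_alt s k h
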